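-- pv_equiv track=rewrite | github.com/danand6/fpl-toolkit-gui | fpl_logic.py | _count_blank_players
-- ===== SOURCE A (Python) =====
-- def _count_blank_players(players: list, fixtures_data: list, current_gameweek: int) -> int:
--     upcoming = [f for f in fixtures_data if f.get('event') and f['event'] >= current_gameweek]
--     players_with_fixtures = set()
--     for fixture in upcoming:
--         players_with_fixtures.add(fixture['team_a'])
--         players_with_fixtures.add(fixture['team_h'])
--
--     blanks = 0
--     for info in players:
--         team_id = info['player'].get('team')
--         if team_id not in players_with_fixtures:
--             blanks += 1
--     return blanks
-- ===== SOURCE B (Python) =====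
-- def _count_blank_players(players: list, fixtures_data: list, current_gameweek: int) -> int:
--     # Count players per team, then add up, fixture by fixture, the players whose
--     # team gets its first upcoming fixture; blanks = total - covered.
--     team_counts = {}
--     for info in players:
--         t = info['player'].get('team')
--         team_counts[t] = team_counts.get(t, 0) + 1
--     covered = 0
--     seen = set()
--     for f in fixtures_data:
--         if f.get('event') and f['event'] >= current_gameweek:
--             for t in (f['team_a'], f['team_h']):
--                 if t not in seen:
--                     seen.add(t)
--                     covered += team_counts.get(t, 0)
--     return len(players) - covered
-- ===== Notes on version B (the rewrite author's own statement) =====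
-- stated objective: alternative
-- what changed: Instead of classifying each player individually against a set of teams with fixtures, B builds a counter of players per team, then makes one pass over the fixtures adding each newly-seen covered team's player count to an accumulator, and returns len(players) minus the covered total.
import Mathlib
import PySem

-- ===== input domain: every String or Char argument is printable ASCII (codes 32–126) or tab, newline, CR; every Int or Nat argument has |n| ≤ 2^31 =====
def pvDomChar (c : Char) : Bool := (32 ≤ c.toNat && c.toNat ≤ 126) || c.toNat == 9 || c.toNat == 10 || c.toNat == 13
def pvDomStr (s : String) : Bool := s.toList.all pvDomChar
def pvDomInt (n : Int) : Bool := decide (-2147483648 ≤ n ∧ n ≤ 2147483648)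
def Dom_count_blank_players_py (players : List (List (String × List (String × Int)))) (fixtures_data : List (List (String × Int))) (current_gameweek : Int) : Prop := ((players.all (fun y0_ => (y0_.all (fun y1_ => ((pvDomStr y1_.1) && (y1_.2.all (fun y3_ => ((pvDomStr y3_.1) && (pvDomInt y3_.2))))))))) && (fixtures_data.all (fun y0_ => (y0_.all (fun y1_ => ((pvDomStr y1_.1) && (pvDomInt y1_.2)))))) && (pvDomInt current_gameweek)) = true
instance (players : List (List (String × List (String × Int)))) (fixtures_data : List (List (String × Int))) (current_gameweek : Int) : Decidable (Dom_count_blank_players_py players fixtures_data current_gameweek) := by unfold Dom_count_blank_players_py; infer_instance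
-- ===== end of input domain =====

-- B replaces A's per-player membership test with a counter of players per team plus one
-- pass over the fixtures accumulating covered players; same return value wherever A returns.

-- ===== PORT A =====
def count_blank_players_py (players : List (List (String × List (String × Int)))) (fixtures_data : List (List (String × Int))) (current_gameweek : Int) : Int :=
  let upcoming := fixtures_data.filter (fun f =>
    match (PySem.Dict.mk f).get? "event" with
    | some e => decide (e ≠ 0) && decide (current_gameweek ≤ e)
    | none => false)
  let players_with_fixtures : PySem.Set Int := upcoming.foldl (fun s f =>
    PySem.Set.add (PySem.Set.add s ((PySem.Dict.mk f).getD "team_a" 0)) ((PySem.Dict.mk f).getD "team_h" 0)) PySem.Set.empty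
  players.foldl (fun blanks info =>
    let team_id := (PySem.Dict.mk ((PySem.Dict.mk info).getD "player" [])).get? "team"
    if (match team_id with
        | some t => PySem.Set.contains players_with_fixtures t
        | none => false)
    then blanks else blanks + 1) 0

-- ===== PORT B =====
def count_blank_players_py_alt (players : List (List (String × List (String × Int)))) (fixtures_data : List (List (String × Int))) (current_gameweek : Int) : Int :=
  let team_counts : PySem.Dict (Option Int) Int := players.foldl (fun d info =>
    let t := (PySem.Dict.mk ((PySem.Dict.mk info).getD "player" [])).get? "team"
    d.insert t (d.getD t 0 + 1)) PySem.Dict.empty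
  let r := fixtures_data.foldl (fun (st : PySem.Set Int × Int) f =>
    if (match (PySem.Dict.mk f).get? "event" with
        | some e => decide (e ≠ 0) && decide (current_gameweek ≤ e)
        | none => false)
    then
      [(PySem.Dict.mk f).getD "team_a" 0, (PySem.Dict.mk f).getD "team_h" 0].foldl
        (fun (st : PySem.Set Int × Int) t =>
          if PySem.Set.contains st.1 t then st
          else (PySem.Set.add st.1 t, st.2 + team_counts.getD (some t) 0)) st
    else st) (PySem.Set.empty, (0 : Int))
  (players.length : Int) - r.2

-- ===== PRECONDITION & SPEC =====
-- Pre_ excludes exactly the inputs where A raises KeyError: a player dict missing the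
-- 'player' key, or an upcoming fixture (truthy event ≥ current_gameweek) missing 'team_a' or 'team_h'.
def Pre_count_blank_players_py (players : List (List (String × List (String × Int)))) (fixtures_data : List (List (String × Int))) (current_gameweek : Int) : Prop :=
  (players.all (fun info => (PySem.Dict.mk info).contains "player")
   && fixtures_data.all (fun f =>
        match (PySem.Dict.mk f).get? "event" with
        | some e => !(decide (e ≠ 0) && decide (current_gameweek ≤ e))
            || ((PySem.Dict.mk f).contains "team_a" && (PySem.Dict.mk f).contains "team_h")
        | none => true)) = true
instance (players : List (List (String × List (String × Int)))) (fixtures_data : List (List (String × Int))) (current_gameweek : Int) : Decidable (Pre_count_blank_players_py players fixtures_data current_gameweek) := by unfold Pre_count_blank_players_py; infer_instance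

def pvWitness_count_blank_players_py : (List (List (String × List (String × Int)))) × (List (List (String × Int))) × Int :=
  ([[("player", [("team", 3)])], [("player", [])]],
   [[("event", 2), ("team_a", 3), ("team_h", 4)], [("event", 0), ("team_a", 9)]], 1)

def Spec_count_blank_players_py (players : List (List (String × List (String × Int)))) (fixtures_data : List (List (String × Int))) (current_gameweek : Int) (out : Int) : Prop := out = count_blank_players_py_alt players fixtures_data current_gameweek
instance (players : List (List (String × List (String × Int)))) (fixtures_data : List (List (String × Int))) (current_gameweek : Int) (out : Int) : Decidable (Spec_count_blank_players_py players fixtures_data current_gameweek out) := by unfold Spec_count_blank_players_py; infer_instance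

-- ===== CLAIM =====
def Claim_equal_count_blank_players_py : Prop := ∀ (players : List (List (String × List (String × Int)))) (fixtures_data : List (List (String × Int))) (current_gameweek : Int), Dom_count_blank_players_py players fixtures_data current_gameweek → Pre_count_blank_players_py players fixtures_data current_gameweek → Spec_count_blank_players_py players fixtures_data current_gameweek (count_blank_players_py players fixtures_data current_gameweek)

-- ===== LEMMAS AND PROOFS =====

-- the player's team id as A and B both read it
def pvTid (info : List (String × List (String × Int))) : Option Int :=
  (PySem.Dict.mk ((PySem.Dict.mk info).getD "player" [])).get? "team"

-- the fixture predicate (truthy event ≥ current_gameweek)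
def pvQual (cg : Int) (f : List (String × Int)) : Bool :=
  match (PySem.Dict.mk f).get? "event" with
  | some e => decide (e ≠ 0) && decide (cg ≤ e)
  | none => false

-- a team id is "covered" by a set of teams
def pvCov (s : PySem.Set Int) (t : Option Int) : Bool :=
  match t with
  | some t => PySem.Set.contains s t
  | none => false

-- B's inner step and fixture step, named so rewriting stays controlled
def pvStep (players : List (List (String × List (String × Int)))) (st : PySem.Set Int × Int) (t : Int) : PySem.Set Int × Int :=
  if PySem.Set.contains st.1 t then st
  else (PySem.Set.add st.1 t, st.2 + ((players.map pvTid).count (some t) : Int))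

def pvBig (players : List (List (String × List (String × Int)))) (cg : Int) (st : PySem.Set Int × Int) (f : List (String × Int)) : PySem.Set Int × Int :=
  if pvQual cg f
  then [(PySem.Dict.mk f).getD "team_a" 0, (PySem.Dict.mk f).getD "team_h" 0].foldl (pvStep players) st
  else st

-- the same fixture step, reading the counter dictionary as the port of B literally does
def pvCounter (players : List (List (String × List (String × Int)))) : PySem.Dict (Option Int) Int :=
  players.foldl (fun d info => d.insert (pvTid info) (d.getD (pvTid info) 0 + 1)) PySem.Dict.empty

def pvBigD (players : List (List (String × List (String × Int)))) (cg : Int) (st : PySem.Set Int × Int) (f : List (String × Int)) : PySem.Set Int × Int :=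
  if pvQual cg f
  then [(PySem.Dict.mk f).getD "team_a" 0, (PySem.Dict.mk f).getD "team_h" 0].foldl
    (fun (st : PySem.Set Int × Int) t =>
      if PySem.Set.contains st.1 t then st
      else (PySem.Set.add st.1 t, st.2 + (pvCounter players).getD (some t) 0)) st
  else st

-- membership in the set A folds up over the upcoming fixtures
theorem pv_mem_fold (l : List (List (String × Int))) (s : PySem.Set Int) (t : Int) :
    (t ∈ l.foldl (fun s f =>
      PySem.Set.add (PySem.Set.add s ((PySem.Dict.mk f).getD "team_a" 0)) ((PySem.Dict.mk f).getD "team_h" 0)) s)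
    ↔ t ∈ s ∨ ∃ f ∈ l, (PySem.Dict.mk f).getD "team_a" 0 = t ∨ (PySem.Dict.mk f).getD "team_h" 0 = t := by
  induction l generalizing s with
  | nil => simp
  | cons f l ih =>
    simp only [List.foldl_cons, ih, PySem.Set.mem_add, List.mem_cons]
    constructor
    · rintro (((h | h) | h) | ⟨g, hg, h⟩)
      · exact Or.inl h
      · exact Or.inr ⟨f, Or.inl rfl, Or.inl h.symm⟩
      · exact Or.inr ⟨f, Or.inl rfl, Or.inr h.symm⟩
      · exact Or.inr ⟨g, Or.inr hg, h⟩
    · rintro (h | ⟨g, (rfl | hg), h⟩)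
      · exact Or.inl (Or.inl (Or.inl h))
      · rcases h with h | h
        · exact Or.inl (Or.inl (Or.inr h.symm))
        · exact Or.inl (Or.inr h.symm)
      · exact Or.inr ⟨g, hg, h⟩

-- A's player loop counts the uncovered players
theorem pv_foldl_blanks (l : List (List (String × List (String × Int)))) (p : List (String × List (String × Int)) → Bool) (n : Int) :
    l.foldl (fun b info => if p info then b else b + 1) n
      = n + (l.countP (fun info => !p info) : Int) := by
  induction l generalizing n with
  | nil => simp
  | cons x l ih =>
    simp only [List.foldl_cons, ih, List.countP_cons]
    by_cases h : p x <;> simp [h] <;> omega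

theorem pv_countP_or_disjoint {α : Type} (l : List α) (p q : α → Bool)
    (h : ∀ x ∈ l, ¬(p x = true ∧ q x = true)) :
    l.countP (fun x => p x || q x) = l.countP p + l.countP q := by
  induction l with
  | nil => simp
  | cons x l ih =>
    simp only [List.countP_cons]
    rw [ih (fun y hy => h y (List.mem_cons_of_mem _ hy))]
    have := h x (List.mem_cons_self ..)
    by_cases hp : p x <;> by_cases hq : q x <;> simp_all <;> omega

-- covering after adding a new team, per element
theorem pv_cov_add (s : PySem.Set Int) (u : Int) (t : Option Int) :
    pvCov (PySem.Set.add s u) t = (pvCov s t || (t == some u)) := by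
  cases t with
  | none => simp [pvCov]
  | some v =>
    simp only [pvCov]
    rw [Bool.eq_iff_iff]
    simp only [Bool.or_eq_true, PySem.Set.contains_iff, PySem.Set.mem_add, beq_iff_eq,
      Option.some.injEq]

-- one step of B's inner loop keeps the covered-count invariant
theorem pv_step_inv (players : List (List (String × List (String × Int)))) (st : PySem.Set Int × Int) (u : Int)
    (hc : st.2 = (players.countP (fun i => pvCov st.1 (pvTid i)) : Int)) :
    (pvStep players st u).2 = (players.countP (fun i => pvCov (pvStep players st u).1 (pvTid i)) : Int) := by
  unfold pvStep
  by_cases h : PySem.Set.contains st.1 u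
  · rw [if_pos h]; exact hc
  · rw [if_neg h]
    dsimp only
    have hdisj : ∀ i ∈ players, ¬(pvCov st.1 (pvTid i) = true ∧ (pvTid i == some u) = true) := by
      intro i _ ⟨h1, h2⟩
      rw [beq_iff_eq] at h2
      rw [h2] at h1
      simp only [pvCov] at h1
      exact h h1
    have hsum : players.countP (fun i => pvCov (PySem.Set.add st.1 u) (pvTid i))
        = players.countP (fun i => pvCov st.1 (pvTid i)) + players.countP (fun i => pvTid i == some u) := by
      rw [← pv_countP_or_disjoint _ _ _ hdisj]
      exact List.countP_congr (fun i _ => by rw [pv_cov_add])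
    rw [hsum, hc]
    have hcnt : (players.map pvTid).count (some u) = players.countP (fun i => pvTid i == some u) := by
      simp [List.count, List.countP_map, Function.comp_def]
    rw [hcnt]; push_cast; ring

-- membership after one pvStep
theorem pv_step_mem (players : List (List (String × List (String × Int)))) (st : PySem.Set Int × Int) (u t : Int) :
    t ∈ (pvStep players st u).1 ↔ t ∈ st.1 ∨ t = u := by
  unfold pvStep
  split_ifs with h
  · constructor
    · exact Or.inl
    · rintro (h' | rfl)
      · exact h'
      · exact (PySem.Set.contains_iff _ _).mp h
  · dsimp only
    rw [PySem.Set.mem_add]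

-- B's fixture loop: snd stays the covered-count of fst, and fst's membership is characterised
theorem pv_fixloop (players : List (List (String × List (String × Int)))) (cg : Int)
    (l : List (List (String × Int))) (st : PySem.Set Int × Int)
    (hc : st.2 = (players.countP (fun i => pvCov st.1 (pvTid i)) : Int)) :
    (l.foldl (pvBig players cg) st).2
      = (players.countP (fun i => pvCov (l.foldl (pvBig players cg) st).1 (pvTid i)) : Int)
    ∧ ∀ t, (t ∈ (l.foldl (pvBig players cg) st).1
        ↔ t ∈ st.1 ∨ ∃ f ∈ l, pvQual cg f ∧ ((PySem.Dict.mk f).getD "team_a" 0 = t ∨ (PySem.Dict.mk f).getD "team_h" 0 = t)) := by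
  induction l generalizing st with
  | nil => exact ⟨hc, by simp⟩
  | cons f l ih =>
    rw [List.foldl_cons]
    have hbig : ∀ t, (t ∈ (pvBig players cg st f).1 ↔
        t ∈ st.1 ∨ (pvQual cg f ∧ ((PySem.Dict.mk f).getD "team_a" 0 = t ∨ (PySem.Dict.mk f).getD "team_h" 0 = t))) := by
      intro t
      unfold pvBig
      split_ifs with hq
      · simp only [List.foldl_cons, List.foldl_nil, pv_step_mem]
        constructor
        · rintro ((h' | rfl) | rfl)
          · exact Or.inl h'
          · exact Or.inr ⟨hq, Or.inl rfl⟩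
          · exact Or.inr ⟨hq, Or.inr rfl⟩
        · rintro (h' | ⟨-, rfl | rfl⟩)
          · exact Or.inl (Or.inl h')
          · exact Or.inl (Or.inr rfl)
          · exact Or.inr rfl
      · simp [hq]
    have hbig2 : (pvBig players cg st f).2
        = (players.countP (fun i => pvCov (pvBig players cg st f).1 (pvTid i)) : Int) := by
      unfold pvBig
      split_ifs with hq
      · simp only [List.foldl_cons, List.foldl_nil]
        exact pv_step_inv players _ _ (pv_step_inv players st _ hc)
      · exact hc
    obtain ⟨ihA, ihB⟩ := ih (pvBig players cg st f) hbig2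
    refine ⟨ihA, fun t => ?_⟩
    rw [ihB t, hbig t]
    simp only [List.mem_cons]
    constructor
    · rintro ((h' | ⟨hq, hgt⟩) | ⟨g, hg, hgq, hgt⟩)
      · exact Or.inl h'
      · exact Or.inr ⟨f, Or.inl rfl, hq, hgt⟩
      · exact Or.inr ⟨g, Or.inr hg, hgq, hgt⟩
    · rintro (h' | ⟨g, (rfl | hg), hgq, hgt⟩)
      · exact Or.inl (Or.inl h')
      · exact Or.inl (Or.inr ⟨hgq, hgt⟩)
      · exact Or.inr ⟨g, hg, hgq, hgt⟩

-- B's team counter reads off the number of players on a team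
theorem pv_counter (players : List (List (String × List (String × Int)))) (t : Int) :
    (players.foldl (fun d info =>
      d.insert (pvTid info) (d.getD (pvTid info) 0 + 1)) PySem.Dict.empty).getD (some t) 0
      = ((players.map pvTid).count (some t) : Int) := by
  have h := PySem.Dict.getD_foldl_insert_add_one (players.map pvTid) PySem.Dict.empty (some t)
  rw [List.foldl_map] at h
  rw [h]
  rw [show (PySem.Dict.empty : PySem.Dict (Option Int) Int).getD (some t) 0 = 0 from rfl, zero_add]

theorem pv_length_split (players : List (List (String × List (String × Int)))) (p : List (String × List (String × Int)) → Bool) :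
    (players.length : Int) = (players.countP p : Int) + (players.countP (fun i => !p i) : Int) := by
  induction players with
  | nil => simp
  | cons x l ih =>
    simp only [List.length_cons, List.countP_cons]
    by_cases h : p x <;> simp [h] <;> omega

-- ===== VERDICT =====
theorem count_blank_players_py_spec : Claim_equal_count_blank_players_py := by
  intro players fixtures_data cg _ _
  unfold Spec_count_blank_players_py
  have hA : count_blank_players_py players fixtures_data cg
      = players.foldl (fun b info =>
          if pvCov ((fixtures_data.filter (pvQual cg)).foldl (fun s f =>
            PySem.Set.add (PySem.Set.add s ((PySem.Dict.mk f).getD "team_a" 0)) ((PySem.Dict.mk f).getD "team_h" 0)) PySem.Set.empty) (pvTid info)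
          then b else b + 1) 0 := rfl
  have hB : count_blank_players_py_alt players fixtures_data cg
      = (players.length : Int) - (fixtures_data.foldl (pvBigD players cg) (PySem.Set.empty, (0 : Int))).2 := rfl
  have hD : fixtures_data.foldl (pvBigD players cg) (PySem.Set.empty, (0 : Int))
      = fixtures_data.foldl (pvBig players cg) (PySem.Set.empty, (0 : Int)) := by
    apply congrArg (fun g => List.foldl g (PySem.Set.empty, (0 : Int)) fixtures_data)
    funext st f
    unfold pvBigD pvBig
    congr 1
    apply congrArg (fun g => List.foldl g st _)
    funext st' t
    unfold pvStep
    rw [show (pvCounter players).getD (some t) 0 = ((players.map pvTid).count (some t) : Int) from pv_counter players t]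
  rw [hA, hB, hD]
  obtain ⟨hsnd, hmem⟩ := pv_fixloop players cg fixtures_data (PySem.Set.empty, (0 : Int))
    (by
      have h0 : players.countP (fun i => pvCov ([] : PySem.Set Int) (pvTid i)) = 0 :=
        List.countP_eq_zero.mpr (fun i _ => by cases pvTid i <;> simp [pvCov])
      simp [PySem.Set.empty, h0])
  rw [pv_foldl_blanks players (fun info => pvCov ((fixtures_data.filter (pvQual cg)).foldl (fun s f =>
      PySem.Set.add (PySem.Set.add s ((PySem.Dict.mk f).getD "team_a" 0)) ((PySem.Dict.mk f).getD "team_h" 0)) PySem.Set.empty) (pvTid info)) 0]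
  rw [hsnd, zero_add]
  -- both covered predicates agree elementwise
  have hpt : ∀ i ∈ players, pvCov ((fixtures_data.filter (pvQual cg)).foldl (fun s f =>
        PySem.Set.add (PySem.Set.add s ((PySem.Dict.mk f).getD "team_a" 0)) ((PySem.Dict.mk f).getD "team_h" 0)) PySem.Set.empty) (pvTid i)
      = pvCov (fixtures_data.foldl (pvBig players cg) (PySem.Set.empty, (0 : Int))).1 (pvTid i) := by
    intro i _
    cases htid : pvTid i with
    | none => simp [pvCov]
    | some u =>
      simp only [pvCov]
      rw [Bool.eq_iff_iff, PySem.Set.contains_iff, PySem.Set.contains_iff, pv_mem_fold, hmem u]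
      simp only [PySem.Set.empty, List.not_mem_nil, false_or, List.mem_filter]
      constructor
      · rintro ⟨g, ⟨hg, hq⟩, ht⟩; exact ⟨g, hg, hq, ht⟩
      · rintro ⟨g, hg, hq, ht⟩; exact ⟨g, ⟨hg, hq⟩, ht⟩
  rw [show players.countP (fun info => !pvCov ((fixtures_data.filter (pvQual cg)).foldl (fun s f =>
        PySem.Set.add (PySem.Set.add s ((PySem.Dict.mk f).getD "team_a" 0)) ((PySem.Dict.mk f).getD "team_h" 0)) PySem.Set.empty) (pvTid info))
      = players.countP (fun i => !pvCov (fixtures_data.foldl (pvBig players cg) (PySem.Set.empty, (0 : Int))).1 (pvTid i))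
    from List.countP_congr (fun i hi => by rw [hpt i hi])]
  rw [pv_length_split players (fun i => pvCov (fixtures_data.foldl (pvBig players cg) (PySem.Set.empty, (0 : Int))).1 (pvTid i))]
  ring
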